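-- pv_equiv track=rewrite | github.com/Kurman11/algorithm | 프로그래머스/2/77885. 2개 이하로 다른 비트/2개 이하로 다른 비트.py | solution
-- ===== SOURCE A (Python) =====
-- def solution(numbers) :
--     answer = []
--     for number in numbers :
--         bin_num = list('0' + bin(number)[2:])
--         index = ''.join(bin_num).rfind('0')
--         bin_num[index] = '1'
--
--         if number % 2 == 1 :
--             bin_num[index+1] = '0'
--
--         answer.append(int(''.join(bin_num), 2))
--
--     return answer
-- ===== SOURCE B (Python) =====
-- def solution(numbers):
--     # Pure integer arithmetic: even n -> n+1; odd n -> add half the lowest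
--     # clear-bit value, found by stripping trailing one-bits.
--     def step(n):
--         if n % 2 == 0:
--             return n + 1
--         m, k = n, 0
--         while m % 2 == 1:
--             m //= 2
--             k += 1
--         return n + (1 << (k - 1))
--     return [step(n) for n in numbers]
-- ===== Notes on version B (the rewrite author's own statement) =====
-- stated objective: simpler
-- what changed: Replaces bin()-string building, rfind scanning and int(...,2) re-parsing by pure integer arithmetic: even n yields n+1, odd n adds 2^(k-1) where k is the number of trailing one-bits, found by halving.
-- outside the precondition, e.g. on solution([-2]): A returns [3], B returns [-1]; on solution([-3]): A returns [11], B returns [-2]; on solution([-1]): A returns [5], B does not finish within the time limit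
import Mathlib
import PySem

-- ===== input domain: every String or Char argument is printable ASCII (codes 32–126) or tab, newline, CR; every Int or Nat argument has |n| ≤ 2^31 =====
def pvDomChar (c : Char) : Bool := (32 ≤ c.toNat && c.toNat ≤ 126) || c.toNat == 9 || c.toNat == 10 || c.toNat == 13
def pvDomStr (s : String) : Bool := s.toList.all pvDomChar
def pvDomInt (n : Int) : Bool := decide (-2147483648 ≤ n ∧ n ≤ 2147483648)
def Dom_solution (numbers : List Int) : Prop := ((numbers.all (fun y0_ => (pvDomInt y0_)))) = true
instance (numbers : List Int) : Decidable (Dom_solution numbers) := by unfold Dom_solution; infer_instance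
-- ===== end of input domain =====

-- B replaces A's bin()-string surgery by pure integer arithmetic (simpler, no string round-trip).

-- ===== PORT A =====
-- int(''.join(cs), 2): hand-ported; exact on the strings this program builds — nonempty
-- binary-digit strings, optionally '0b'-prefixed (Python raises on other strings, which
-- cannot occur here since '0'+bin(n)[2:] only yields such strings after the edits).
def pvInt2Fold (s : List Char) : Int :=
  s.foldl (fun a c => 2 * a + (if c = '1' then 1 else 0)) 0

def pvInt2 (s : List Char) : Int :=
  if s.take 2 = ['0', 'b'] then pvInt2Fold (s.drop 2) else pvInt2Fold s

-- the loop body of A: bin_num = list('0'+bin(number)[2:]); index = rfind('0'); edits; int(...,2).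
-- ''.join(bin_num) is the identity on our List Char model of the char list.
-- index is always ≥ 0 here ('0' is at position 0 of bin_num), so .toNat is exact.
def pvAStep (number : Int) : Int :=
  let bin_num : List Char := '0' :: (PySem.Int.toBinChars0b number).drop 2
  let index : Int := PySem.Chars.rfind bin_num ['0']
  let b1 : List Char := bin_num.set index.toNat '1'
  let b2 : List Char := if PySem.Int.mod number 2 = 1 then b1.set (index.toNat + 1) '0' else b1
  pvInt2 b2

def solution (numbers : List Int) : List Int :=
  numbers.foldl (fun answer number => answer ++ [pvAStep number]) []

-- ===== PORT B =====
-- the while-loop of Source B: only k is used afterwards, so the loop returns k.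
-- The fuel argument only makes the recursion total (natAbs n + 2 exceeds the iteration
-- count of every terminating Python run; the Python loop diverges for odd negative n,
-- which Pre_solution excludes).
def pvStepLoop : Nat → Int → Nat → Nat
  | 0, _, k => k
  | fuel + 1, m, k =>
    if PySem.Int.mod m 2 = 1 then pvStepLoop fuel (PySem.Int.floordiv m 2) (k + 1) else k

def pvStep (n : Int) : Int :=
  if PySem.Int.mod n 2 = 0 then n + 1
  else
    let k := pvStepLoop (n.natAbs + 2) n 0
    n + 2 ^ (k - 1)   -- 1 << (k - 1); k ≥ 1 whenever this branch runs

def solution_alt (numbers : List Int) : List Int := numbers.map pvStep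

-- ===== PRECONDITION & SPEC =====
-- Pre_ excludes lists containing a negative number: negatives are outside the problem's
-- natural domain (the bit pattern of a nonnegative number), and A's values there are an
-- accident of slicing '-0b…' produced by bin(); see the cited examples in the claim.
def Pre_solution (numbers : List Int) : Prop := ∀ x ∈ numbers, 0 ≤ x
instance (numbers : List Int) : Decidable (Pre_solution numbers) := by
  unfold Pre_solution; infer_instance

def pvWitness_solution : List Int := [0, 1, 6, 7, 1023]

def Spec_solution (numbers : List Int) (out : List Int) : Prop := out = solution_alt numbers
instance (numbers : List Int) (out : List Int) : Decidable (Spec_solution numbers out) := by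
  unfold Spec_solution; infer_instance

-- ===== CLAIM (what is proved, stated in full; the proofs are below) =====
def Claim_equal_solution : Prop :=
  ∀ (numbers : List Int), Dom_solution numbers → Pre_solution numbers →
    Spec_solution numbers (solution numbers)

-- ===== LEMMAS AND PROOFS =====

-- binary digits of n, MSB first (= Nat.toDigits 2 n, proved below)
def pvBits (n : Nat) : List Char :=
  if _h : n < 2 then [n.digitChar]
  else pvBits (n / 2) ++ [(n % 2).digitChar]
decreasing_by exact Nat.div_lt_self (by omega) (by omega)

theorem pvBits_lt (n : Nat) (h : n < 2) : pvBits n = [n.digitChar] := by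
  rw [pvBits]; simp [h]

theorem pvBits_ge (n : Nat) (h : 2 ≤ n) : pvBits n = pvBits (n / 2) ++ [(n % 2).digitChar] := by
  rw [pvBits]; simp [Nat.not_lt.2 h]

theorem toDigitsCore2 :
    ∀ (fuel n : Nat) (ds : List Char), n < fuel →
      Nat.toDigitsCore 2 fuel n ds = pvBits n ++ ds := by
  intro fuel
  induction fuel with
  | zero => intro n ds _; omega
  | succ f ih =>
    intro n ds h
    rw [Nat.toDigitsCore]
    by_cases h2 : n / 2 = 0
    · have hn2 : n < 2 := by omega
      simp [h2, pvBits_lt n hn2, Nat.mod_eq_of_lt hn2]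
    · have hn2 : 2 ≤ n := by
        rcases Nat.lt_or_ge n 2 with hl | hg
        · exfalso; apply h2; omega
        · exact hg
      have hdlt : n / 2 < n := Nat.div_lt_self (by omega) (by omega)
      simp only [h2]
      rw [ih (n / 2) _ (by omega)]
      rw [pvBits_ge n hn2]
      simp

theorem toDigits2 (n : Nat) : Nat.toDigits 2 n = pvBits n := by
  unfold Nat.toDigits
  rw [toDigitsCore2 (n + 1) n [] (Nat.lt_succ_self n)]
  simp

theorem fold_from (s : List Char) :
    ∀ a : Int,
      s.foldl (fun a c => 2 * a + (if c = '1' then 1 else 0)) a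
        = a * 2 ^ s.length + pvInt2Fold s := by
  induction s with
  | nil => intro a; simp [pvInt2Fold]
  | cons c t ih =>
    intro a
    have h1 := ih (2 * a + (if c = '1' then 1 else 0))
    have h2 := ih (2 * 0 + (if c = '1' then 1 else 0))
    simp only [List.foldl_cons, List.length_cons, pvInt2Fold] at *
    rw [h1, h2]
    ring

theorem fold_append (u v : List Char) :
    pvInt2Fold (u ++ v) = pvInt2Fold u * 2 ^ v.length + pvInt2Fold v := by
  unfold pvInt2Fold
  rw [List.foldl_append, fold_from]
  rfl

theorem fold_cons0 (s : List Char) : pvInt2Fold ('0' :: s) = pvInt2Fold s := by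
  simp [pvInt2Fold]

theorem fold_rep1 (k : Nat) : pvInt2Fold (List.replicate k '1') = 2 ^ k - 1 := by
  induction k with
  | zero => simp [pvInt2Fold]
  | succ k ih =>
    rw [List.replicate_succ]
    show pvInt2Fold ('1' :: List.replicate k '1') = _
    unfold pvInt2Fold
    simp only [List.foldl_cons]
    rw [fold_from, ih]
    simp only [List.length_replicate]
    norm_num
    ring

theorem fold_pvBits (n : Nat) : pvInt2Fold (pvBits n) = (n : Int) := by
  induction n using Nat.strong_induction_on with
  | _ n ih =>
    by_cases h : n < 2
    · rw [pvBits_lt n h]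
      interval_cases n <;> simp [pvInt2Fold, Nat.digitChar]
    · have h2 : 2 ≤ n := by omega
      rw [pvBits_ge n h2, fold_append, ih (n / 2) (Nat.div_lt_self (by omega) (by omega))]
      have := Nat.div_add_mod n 2
      rcases Nat.mod_two_eq_zero_or_one n with hm | hm <;>
        · rw [hm]
          simp [pvInt2Fold, Nat.digitChar]
          omega

theorem pvBits_mem (n : Nat) : ∀ c ∈ pvBits n, c = '0' ∨ c = '1' := by
  induction n using Nat.strong_induction_on with
  | _ n ih =>
    by_cases h : n < 2
    · rw [pvBits_lt n h]
      interval_cases n <;> simp [Nat.digitChar]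
    · have h2 : 2 ≤ n := by omega
      rw [pvBits_ge n h2]
      intro c hc
      rcases List.mem_append.1 hc with hc | hc
      · exact ih (n / 2) (Nat.div_lt_self (by omega) (by omega)) c hc
      · rcases Nat.mod_two_eq_zero_or_one n with hm | hm <;>
          · rw [hm] at hc
            simp [Nat.digitChar] at hc
            simp [hc]

-- number of trailing one-bits
def pvTr (n : Nat) : Nat :=
  if h : n % 2 = 1 then pvTr (n / 2) + 1 else 0
decreasing_by exact Nat.div_lt_self (by omega) (by omega)

theorem pvTr_even {n : Nat} (h : n % 2 = 0) : pvTr n = 0 := by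
  rw [pvTr]; simp [h]

theorem pvTr_odd {n : Nat} (h : n % 2 = 1) : pvTr n = pvTr (n / 2) + 1 := by
  rw [pvTr]; simp [h]

theorem pvDecomp (m : Nat) :
    ∃ u : List Char, (∀ c ∈ u, c = '0' ∨ c = '1') ∧
      '0' :: pvBits m = u ++ '0' :: List.replicate (pvTr m) '1' := by
  induction m using Nat.strong_induction_on with
  | _ m ih =>
    rcases Nat.mod_two_eq_zero_or_one m with h | h
    · rw [pvTr_even h]
      by_cases h2 : m < 2
      · have hm0 : m = 0 := by omega
        subst hm0
        refine ⟨['0'], by simp, ?_⟩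
        rw [pvBits_lt 0 (by omega)]
        simp [Nat.digitChar]
      · have h2' : 2 ≤ m := by omega
        rw [pvBits_ge m h2']
        refine ⟨'0' :: pvBits (m / 2), ?_, ?_⟩
        · intro c hc
          rcases List.mem_cons.1 hc with hc | hc
          · exact Or.inl hc
          · exact pvBits_mem (m / 2) c hc
        · rw [h]
          simp [Nat.digitChar]
    · rw [pvTr_odd h]
      by_cases h2 : m < 2
      · have hm1 : m = 1 := by omega
        subst hm1
        refine ⟨[], by simp, ?_⟩
        rw [pvBits_lt 1 (by omega)]
        simp [Nat.digitChar, pvTr_even (show (1 : Nat) / 2 % 2 = 0 by norm_num)]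
      · have h2' : 2 ≤ m := by omega
        obtain ⟨u, hu, hd⟩ := ih (m / 2) (Nat.div_lt_self (by omega) (by omega))
        refine ⟨u, hu, ?_⟩
        rw [pvBits_ge m h2', h]
        have : '0' :: (pvBits (m / 2) ++ [Nat.digitChar 1])
            = ('0' :: pvBits (m / 2)) ++ ['1'] := by simp [Nat.digitChar]
        rw [this, hd, List.replicate_succ']
        simp

theorem rfind_go_eq (u : List Char) (k : Nat) :
    ∀ j, u.length ≤ j → j ≤ u.length + 1 + k →
      PySem.Chars.rfind.go (u ++ '0' :: List.replicate k '1') ['0'] j = (u.length : Int) := by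
  intro j
  induction j with
  | zero =>
    intro h1 _
    have hu : u = [] := List.eq_nil_of_length_eq_zero (by omega)
    subst hu
    simp [PySem.Chars.rfind.go, List.isPrefixOf]
  | succ j ihj =>
    intro h1 h2
    rw [PySem.Chars.rfind.go]
    by_cases he : u.length = j + 1
    · have hdrop : (u ++ '0' :: List.replicate k '1').drop (j + 1) = '0' :: List.replicate k '1' := by
        rw [← he]
        exact List.drop_left
      rw [hdrop]
      simp [List.isPrefixOf, he]
    · have hle : u.length ≤ j := by omega
      have hdrop : (u ++ '0' :: List.replicate k '1').drop (j + 1)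
          = List.replicate (k - (j - u.length)) '1' := by
        rw [List.drop_append]
        have h3 : u.drop (j + 1) = [] := List.drop_eq_nil_of_le (by omega)
        have h4 : j + 1 - u.length = (j - u.length) + 1 := by omega
        rw [h3, h4]
        simp [List.drop_replicate]
      rw [hdrop]
      have hpre : (['0'] : List Char).isPrefixOf (List.replicate (k - (j - u.length)) '1') = false := by
        cases hkk : k - (j - u.length) with
        | zero => simp
        | succ t => simp [List.replicate_succ, List.isPrefixOf]
      rw [hpre]
      simp only [Bool.false_eq_true, if_false]
      exact ihj hle (by omega)

theorem rfind_eq (u : List Char) (k : Nat) :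
    PySem.Chars.rfind (u ++ '0' :: List.replicate k '1') ['0'] = (u.length : Int) := by
  unfold PySem.Chars.rfind
  have hlen : (u ++ '0' :: List.replicate k '1').length = u.length + 1 + k := by
    simp [List.length_replicate]; omega
  rw [hlen]
  exact rfind_go_eq u k (u.length + 1 + k) (by omega) (le_refl _)

theorem pvInt2_binary {s : List Char} (h : ∀ c ∈ s, c = '0' ∨ c = '1') :
    pvInt2 s = pvInt2Fold s := by
  unfold pvInt2
  split_ifs with hp
  · exfalso
    have hb : 'b' ∈ s.take 2 := by rw [hp]; decide
    have := h 'b' (List.mem_of_mem_take hb)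
    simp at this
  · rfl

theorem pvStepLoop_eq :
    ∀ (fuel m k : Nat), m < fuel → pvStepLoop fuel (m : Int) k = k + pvTr m := by
  intro fuel
  induction fuel with
  | zero => intro m k h; omega
  | succ f ih =>
    intro m k h
    rw [pvStepLoop]
    have hmod : PySem.Int.mod (m : Int) 2 = ((m % 2 : Nat) : Int) := by
      exact_mod_cast PySem.Int.mod_natCast m 2
    rcases Nat.mod_two_eq_zero_or_one m with hm | hm
    · rw [if_neg (by rw [hmod, hm]; decide), pvTr_even hm]
      omega
    · have hdiv : PySem.Int.floordiv (m : Int) 2 = ((m / 2 : Nat) : Int) := by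
        exact_mod_cast PySem.Int.floordiv_natCast m 2
      rw [if_pos (by rw [hmod, hm]; rfl)]
      have hlt : m / 2 < m := Nat.div_lt_self (by omega) (by omega)
      rw [hdiv, ih (m / 2) (k + 1) (by omega), pvTr_odd hm]
      omega

theorem pvAStep_eq (n : Int) (hn : 0 ≤ n) : pvAStep n = pvStep n := by
  obtain ⟨m, rfl⟩ : ∃ m : Nat, n = (m : Int) := ⟨n.toNat, (Int.toNat_of_nonneg hn).symm⟩
  have hbin : ('0' :: (PySem.Int.toBinChars0b (m : Int)).drop 2) = '0' :: pvBits m := by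
    unfold PySem.Int.toBinChars0b
    rw [if_neg (by omega)]
    simp [toDigits2]
  obtain ⟨u, hu, hd⟩ := pvDecomp m
  have hmod : PySem.Int.mod (m : Int) 2 = ((m % 2 : Nat) : Int) := by
    exact_mod_cast PySem.Int.mod_natCast m 2
  have hmval : pvInt2Fold u * 2 ^ (pvTr m + 1) + (2 ^ pvTr m - 1) = (m : Int) := by
    have h1 : pvInt2Fold ('0' :: pvBits m) = (m : Int) := by
      rw [fold_cons0, fold_pvBits]
    rw [hd] at h1
    rw [fold_append] at h1
    rw [fold_cons0, fold_rep1] at h1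
    simp only [List.length_cons, List.length_replicate] at h1
    linarith [h1]
  unfold pvAStep pvStep
  simp only [hbin, hd, rfind_eq u (pvTr m), Int.toNat_natCast]
  rcases Nat.mod_two_eq_zero_or_one m with hm | hm
  · -- even: no second edit, answer = m + 1
    rw [if_neg (show ¬ PySem.Int.mod (m : Int) 2 = 1 by rw [hmod, hm]; decide),
        if_pos (show PySem.Int.mod (m : Int) 2 = 0 by rw [hmod, hm]; rfl)]
    have htr : pvTr m = 0 := pvTr_even hm
    rw [htr] at hmval ⊢
    simp only [List.replicate_zero]
    rw [List.set_append_right u.length '1' (le_refl _)]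
    simp only [Nat.sub_self, List.set_cons_zero]
    rw [pvInt2_binary (by
      intro c hc
      rcases List.mem_append.1 hc with hc | hc
      · exact hu c hc
      · simp at hc; simp [hc])]
    rw [fold_append]
    simp only [List.length_cons, List.length_nil]
    have : pvInt2Fold ('1' :: ([] : List Char)) = 1 := by decide
    rw [this]
    norm_num at hmval ⊢
    omega
  · -- odd: two edits, answer = m + 2 ^ (pvTr m - 1)
    rw [if_pos (show PySem.Int.mod (m : Int) 2 = 1 by rw [hmod, hm]; rfl),
        if_neg (show ¬ PySem.Int.mod (m : Int) 2 = 0 by rw [hmod, hm]; decide)]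
    obtain ⟨k', hk'⟩ : ∃ k', pvTr m = k' + 1 := ⟨pvTr (m / 2), pvTr_odd hm⟩
    have hloop : pvStepLoop ((m : Int).natAbs + 2) (m : Int) 0 = pvTr m := by
      rw [Int.natAbs_natCast]
      simpa using pvStepLoop_eq (m + 2) m 0 (by omega)
    rw [hloop]
    rw [List.set_append_right u.length '1' (le_refl _)]
    simp only [Nat.sub_self, List.set_cons_zero]
    rw [List.set_append_right (u.length + 1) '0' (by omega)]
    have h1 : u.length + 1 - u.length = 1 := by omega
    rw [h1]
    rw [hk']
    simp only [List.replicate_succ, List.set_cons_succ, List.set_cons_zero]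
    rw [pvInt2_binary (by
      intro c hc
      rcases List.mem_append.1 hc with hc | hc
      · exact hu c hc
      · simp at hc
        rcases hc with hc | hc | hc
        · simp [hc]
        · simp [hc]
        · simp [hc])]
    have hsplit : ('1' :: '0' :: List.replicate k' '1' : List Char)
        = ['1', '0'] ++ List.replicate k' '1' := by simp
    rw [fold_append, hsplit]
    have h2 : pvInt2Fold (['1', '0'] ++ List.replicate k' '1')
        = pvInt2Fold (['1', '0'] : List Char) * 2 ^ k' + (2 ^ k' - 1) := by
      rw [fold_append, fold_rep1]; simp
    have h3 : pvInt2Fold (['1', '0'] : List Char) = 2 := by decide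
    rw [h2, h3]
    rw [hk'] at hmval
    have h4 : (2 : Int) ^ (k' + 1 + 1) = 4 * 2 ^ k' := by ring
    have h5 : (2 : Int) ^ (k' + 1) = 2 * 2 ^ k' := by ring
    rw [h4, h5] at hmval
    have h7 : ((['1', '0'] : List Char) ++ List.replicate k' '1').length = k' + 2 := by
      simp only [List.length_append, List.length_cons, List.length_nil, List.length_replicate]
      omega
    have h8 : k' + 1 - 1 = k' := by omega
    rw [h7, h8]
    have h9 : (2 : Int) ^ (k' + 2) = 4 * 2 ^ k' := by ring
    rw [h9]
    linarith [hmval]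

-- ===== VERDICT (by name: the statement is the Claim_ definition above) =====
theorem solution_spec : Claim_equal_solution := by
  intro numbers _ hpre
  unfold Spec_solution solution solution_alt
  rw [PySem.List.foldl_append_singleton_eq_map]
  simp only [List.nil_append]
  exact List.map_congr_left (fun x hx => pvAStep_eq x (hpre x hx))
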